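-- pv_equiv track=rewrite | github.com/Weli-byte/Remixfy_v3 | app/rhyme_quality_engine.py | detect_internal_rhyme
-- ===== SOURCE A (Python) =====
-- from collections import Counter
--
-- def detect_internal_rhyme(line: str) -> bool:
--     """
--     Detects if there are repeating 3-character suffixes among words
--     in a single line (internal rhyme).
--     """
--     words = line.strip().split()
--     if len(words) < 2:
--         return False
--
--     counts = Counter()
--     for word in words:
--         word_lower = word.lower()
--
--         # Strip simple punctuation from ends for better detection
--         import string
--         word_lower = word_lower.strip(string.punctuation)
--
--         if len(word_lower) >= 3:
--             pattern = word_lower[-3:]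
--             counts[pattern] += 1
--
--             if counts[pattern] >= 2:
--                 # Found at least two words with the same 3-char ending in this line
--                 return True
--
--     return False
-- ===== SOURCE B (Python) =====
-- import string
--
-- def detect_internal_rhyme(line: str) -> bool:
--     words = line.strip().split()
--     if len(words) < 2:
--         return False
--     suffixes = []
--     for word in words:
--         w = word.lower().strip(string.punctuation)
--         if len(w) >= 3:
--             suffixes.append(w[-3:])
--     suffixes.sort()
--     for a, b in zip(suffixes, suffixes[1:]):
--         if a == b:
--             return True
--     return False
-- ===== Notes on version B (the rewrite author's own statement) =====
-- stated objective: alternative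
-- what changed: Replaced A's incremental Counter-with-early-return duplicate counting by collecting all 3-char suffixes into a list, sorting it, and scanning adjacent pairs for an equal neighbour.
import Mathlib
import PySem

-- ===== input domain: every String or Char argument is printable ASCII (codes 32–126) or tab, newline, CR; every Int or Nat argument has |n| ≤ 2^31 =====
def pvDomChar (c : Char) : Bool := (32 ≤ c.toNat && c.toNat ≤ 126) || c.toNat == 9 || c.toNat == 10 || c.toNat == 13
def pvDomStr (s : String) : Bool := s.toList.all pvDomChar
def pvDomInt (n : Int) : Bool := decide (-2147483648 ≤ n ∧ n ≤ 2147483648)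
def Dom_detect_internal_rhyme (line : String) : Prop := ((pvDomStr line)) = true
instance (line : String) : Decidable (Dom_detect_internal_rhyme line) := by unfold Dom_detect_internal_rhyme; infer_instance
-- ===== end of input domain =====

-- B replaces A's incremental Counter-with-early-return by collect-all-suffixes, sort, scan
-- adjacent pairs (a different duplicate-detection strategy; objective: alternative).

-- string.punctuation
def pvPunct : String := "!\"#$%&'()*+,-./:;<=>?@[\\]^_`{|}~"

-- ===== PORT A =====
-- A's for-loop with early return, as structural recursion over the word list carrying the Counter
def pvLoopA : List String → PySem.Dict String Int → Bool
  | [], _ => false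
  | word :: rest, counts =>
    let word_lower := PySem.Str.stripChars (PySem.Str.lower word) pvPunct
    if 3 ≤ PySem.Str.len word_lower then
      let pattern := PySem.Str.slice word_lower (some (-3)) none
      let counts' := counts.modify pattern 0 (· + 1)
      if 2 ≤ counts'.getD pattern 0 then true
      else pvLoopA rest counts'
    else pvLoopA rest counts

def detect_internal_rhyme (line : String) : Bool :=
  let words := PySem.Str.split₀ (PySem.Str.strip line)
  if words.length < 2 then false
  else pvLoopA words PySem.Dict.empty

-- ===== PORT B =====
-- B's suffix-collecting loop
def pvCollectB : List String → List String
  | [] => []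
  | word :: rest =>
    let w := PySem.Str.stripChars (PySem.Str.lower word) pvPunct
    if 3 ≤ PySem.Str.len w then PySem.Str.slice w (some (-3)) none :: pvCollectB rest
    else pvCollectB rest

-- B's adjacent-pair scan over the sorted suffix list
def pvAdjB : List String → Bool
  | a :: b :: r => if a == b then true else pvAdjB (b :: r)
  | _ => false

def detect_internal_rhyme_alt (line : String) : Bool :=
  let words := PySem.Str.split₀ (PySem.Str.strip line)
  if words.length < 2 then false
  else pvAdjB (PySem.List.sorted (pvCollectB words) (fun x => x) false)

-- ===== PRECONDITION & SPEC =====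
def Spec_detect_internal_rhyme (line : String) (out : Bool) : Prop := out = detect_internal_rhyme_alt line
instance (line : String) (out : Bool) : Decidable (Spec_detect_internal_rhyme line out) := by unfold Spec_detect_internal_rhyme; infer_instance

-- ===== CLAIM (what is proved, stated in full; the proofs are below) =====
def Claim_equal_detect_internal_rhyme : Prop := ∀ (line : String), Dom_detect_internal_rhyme line → Spec_detect_internal_rhyme line (detect_internal_rhyme line)

-- ===== LEMMAS AND PROOFS =====

-- A's suffix-counting loop, restated over the suffix list it effectively consumes
def pvLoopS : List String → PySem.Dict String Int → Bool
  | [], _ => false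
  | p :: r, c =>
    let c' := c.modify p 0 (· + 1)
    if 2 ≤ c'.getD p 0 then true else pvLoopS r c'

theorem pvLoopA_eq_loopS (ws : List String) (c : PySem.Dict String Int) :
    pvLoopA ws c = pvLoopS (pvCollectB ws) c := by
  induction ws generalizing c with
  | nil => rfl
  | cons w rest ih =>
    simp only [pvLoopA, pvCollectB]
    split
    · simp only [pvLoopS]
      split
      · rfl
      · exact ih _
    · exact ih c

theorem pvLoopS_counter (l seen : List String) (h : seen.Nodup) :
    pvLoopS l (PySem.Dict.counter seen) = !decide ((seen ++ l).Nodup) := by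
  induction l generalizing seen with
  | nil => simp [pvLoopS, h]
  | cons p r ih =>
    simp only [pvLoopS, ← PySem.Dict.counter_append_singleton, PySem.Dict.getD_counter]
    by_cases hp : p ∈ seen
    · have hc : (1 : Nat) ≤ List.count p seen := List.one_le_count_iff.mpr hp
      have hcond : (2 : Int) ≤ (List.count p (seen ++ [p]) : Int) := by
        simp [List.count_append]; omega
      rw [if_pos hcond]
      have : ¬ (seen ++ p :: r).Nodup := by
        intro hnd
        exact (List.disjoint_of_nodup_append hnd) hp (List.mem_cons_self)
      simp [this]
    · have hc : List.count p seen = 0 := List.count_eq_zero.mpr hp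
      have hcond : ¬ (2 : Int) ≤ (List.count p (seen ++ [p]) : Int) := by
        simp [List.count_append, hc]
      rw [if_neg hcond]
      have hnd : (seen ++ [p]).Nodup :=
        List.Nodup.append h (List.nodup_singleton p)
          (by simpa [List.disjoint_singleton] using hp)
      have := ih (seen ++ [p]) hnd
      simpa [List.append_assoc] using this

theorem pvAdjB_of_pairwise (l : List String) (h : l.Pairwise (· ≤ ·)) :
    pvAdjB l = !decide l.Nodup := by
  induction l with
  | nil => simp [pvAdjB]
  | cons a t ih =>
    cases t with
    | nil => simp [pvAdjB]
    | cons b r =>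
      have hab : a ≤ b := (List.pairwise_cons.mp h).1 b List.mem_cons_self
      have htail : (b :: r).Pairwise (· ≤ ·) := (List.pairwise_cons.mp h).2
      simp only [pvAdjB]
      by_cases he : a = b
      · subst he
        simp [List.nodup_cons]
      · rw [if_neg (by simp [he])]
        have hnotmem : a ∉ b :: r := by
          have hlt : a < b := lt_of_le_of_ne hab he
          intro hmem
          rcases List.mem_cons.mp hmem with h1 | h2
          · exact he h1
          · have : b ≤ a := (List.pairwise_cons.mp htail).1 a h2
            exact absurd (lt_of_lt_of_le hlt this) (lt_irrefl a)
        rw [ih htail]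
        simp [List.nodup_cons, hnotmem]

theorem pvDup_char (ws : List String) :
    pvLoopA ws PySem.Dict.empty
      = pvAdjB (PySem.List.sorted (pvCollectB ws) (fun x => x) false) := by
  have h1 : pvLoopA ws PySem.Dict.empty = !decide ((pvCollectB ws).Nodup) := by
    rw [pvLoopA_eq_loopS]
    have := pvLoopS_counter (pvCollectB ws) [] List.nodup_nil
    simpa using this
  have h2 : pvAdjB (PySem.List.sorted (pvCollectB ws) (fun x => x) false)
      = !decide ((pvCollectB ws).Nodup) := by
    rw [pvAdjB_of_pairwise _ (PySem.List.sorted_pairwise (pvCollectB ws) (fun x => x))]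
    congr 1
    simp [List.Perm.nodup_iff (PySem.List.sorted_perm (pvCollectB ws) (fun x => x) false)]
  rw [h1, h2]

-- ===== VERDICT (by name: the statement is the Claim_ definition above) =====
theorem detect_internal_rhyme_spec : Claim_equal_detect_internal_rhyme := by
  intro line _
  unfold Spec_detect_internal_rhyme detect_internal_rhyme detect_internal_rhyme_alt
  by_cases hlen : (PySem.Str.split₀ (PySem.Str.strip line)).length < 2
  · simp [hlen]
  · simp [hlen, pvDup_char]
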